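-- pv_equiv track=rewrite | github.com/Saisanjaychikkala/codemind-python | Automorphic_Number.py | auto
-- ===== SOURCE A (Python) =====
-- def auto(num,le):
--     sqr=num*num
--     while le:
--         rem1=num%10
--         rem2=sqr%10
--         if rem1!=rem2:
--             return False
--         num=num//10
--         sqr=sqr//10
--         le-=1
--     return True
-- ===== SOURCE B (Python) =====
-- def auto(num, le):
--     # num is automorphic in its last le digits iff 10**le divides num*num - num
--     d = num * num - num
--     if d == 0:
--         return True
--     zeros = 0
--     while d % 10 == 0:
--         d //= 10
--         zeros += 1
--     return le <= zeros
-- ===== Notes on version B (the rewrite author's own statement) =====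
-- stated objective: faster
-- what changed: Instead of peeling and comparing le digit pairs, B counts the trailing decimal zeros of num*num - num once and checks le against that count (num is automorphic in le digits iff 10**le divides num*num - num); Pre_ excludes negative le, on which A's loop diverges for some inputs (e.g. (1,-1)) and otherwise returns an accidental False.
-- outside the precondition, e.g. on auto(1, -1): A does not finish within the time limit, B returns True; on auto(4, -1): A returns False, B returns True; on auto(4, -400): A returns False, B returns True
import Mathlib
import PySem

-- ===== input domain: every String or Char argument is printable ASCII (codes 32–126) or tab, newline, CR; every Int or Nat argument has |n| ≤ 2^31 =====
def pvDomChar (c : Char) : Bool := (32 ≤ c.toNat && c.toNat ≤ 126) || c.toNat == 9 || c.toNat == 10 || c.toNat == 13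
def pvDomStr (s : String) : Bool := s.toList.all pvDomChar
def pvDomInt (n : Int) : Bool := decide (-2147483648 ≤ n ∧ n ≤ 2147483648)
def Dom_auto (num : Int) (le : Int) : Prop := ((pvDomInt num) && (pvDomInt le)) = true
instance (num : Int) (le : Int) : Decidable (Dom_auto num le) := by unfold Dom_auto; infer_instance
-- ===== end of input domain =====

-- B checks le against the trailing-zero count of num*num - num instead of peeling le digit pairs (faster in le).
-- ===== PORT A =====
-- the while loop, with the (nonnegative, Pre_) counter le as structural fuel
def autoGo : Int → Int → Nat → Bool
  | _, _, 0 => true  -- while le: falls through when le == 0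
  | num, sqr, n+1 =>
    if PySem.Int.mod num 10 ≠ PySem.Int.mod sqr 10 then false
    else autoGo (PySem.Int.floordiv num 10) (PySem.Int.floordiv sqr 10) n

def auto (num : Int) (le : Int) : Bool := autoGo num (num * num) le.toNat

-- ===== PORT B =====
-- B's trailing-zero while loop; fuel = |d| bounds the iteration count (each step divides a
-- nonzero d by 10), it is a totality guard only, never reached while the Python loop still runs
def tzGo : Nat → Int → Int → Int
  | 0, _, zeros => zeros
  | fuel+1, d, zeros =>
    if PySem.Int.mod d 10 = 0 then tzGo fuel (PySem.Int.floordiv d 10) (zeros + 1)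
    else zeros

def auto_alt (num : Int) (le : Int) : Bool :=
  let d : Int := num * num - num
  if d = 0 then true
  else decide (le ≤ tzGo d.natAbs d 0)

-- ===== PRECONDITION & SPEC =====
-- Pre_ excludes negative le: there A's loop never terminates on some inputs (e.g. (1,-1)) and
-- returns an accidental early-mismatch False on others, while B's trailing-zero count is
-- naturally ≥ 0 so B answers True.
def Pre_auto (num : Int) (le : Int) : Prop := 0 ≤ le
instance (num : Int) (le : Int) : Decidable (Pre_auto num le) := by unfold Pre_auto; infer_instance
def pvWitness_auto : Int × Int := (76, 2)

def Spec_auto (num : Int) (le : Int) (out : Bool) : Prop := out = auto_alt num le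
instance (num : Int) (le : Int) (out : Bool) : Decidable (Spec_auto num le out) := by unfold Spec_auto; infer_instance

-- ===== CLAIM (what is proved, stated in full; the proofs are below) =====
def Claim_equal_auto : Prop := ∀ (num : Int) (le : Int), Dom_auto num le → Pre_auto num le → Spec_auto num le (auto num le)

-- ===== LEMMAS AND PROOFS =====

-- a % (10 * M) decomposes as last digit plus 10 * (rest mod M)
theorem pv_emod_ten_mul (a M : Int) (hM : 0 < M) :
    a % (10 * M) = a % 10 + 10 * ((a / 10) % M) := by
  have h1 : a = 10 * (a / 10) + a % 10 := (Int.ediv_add_emod a 10).symm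
  have h2 : a / 10 = M * ((a / 10) / M) + (a / 10) % M := (Int.ediv_add_emod (a / 10) M).symm
  have hr1 : 0 ≤ a % 10 := Int.emod_nonneg a (by norm_num)
  have hr1' : a % 10 < 10 := Int.emod_lt_of_pos a (by norm_num)
  have hr2 : 0 ≤ (a / 10) % M := Int.emod_nonneg _ (ne_of_gt hM)
  have hr2' : (a / 10) % M < M := Int.emod_lt_of_pos _ hM
  have ha : a = (10 * M) * ((a / 10) / M) + (a % 10 + 10 * ((a / 10) % M)) := by
    calc a = 10 * (a / 10) + a % 10 := h1
    _ = 10 * (M * ((a / 10) / M) + (a / 10) % M) + a % 10 := by rw [← h2]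
    _ = (10 * M) * ((a / 10) / M) + (a % 10 + 10 * ((a / 10) % M)) := by ring
  have hb0 : 0 ≤ a % 10 + 10 * ((a / 10) % M) := by linarith
  have hb1 : a % 10 + 10 * ((a / 10) % M) < 10 * M := by nlinarith
  calc a % (10 * M) = ((a % 10 + 10 * ((a / 10) % M)) + (10 * M) * ((a / 10) / M)) % (10 * M) := by
        rw [add_comm, ← ha]
    _ = (a % 10 + 10 * ((a / 10) % M)) % (10 * M) := by
        rw [Int.add_mul_emod_self_left]
    _ = a % 10 + 10 * ((a / 10) % M) := Int.emod_eq_of_lt hb0 hb1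

-- A's loop over n digits is exactly equality of residues modulo 10^n
theorem pv_autoGo_eq (n : Nat) : ∀ (num sqr : Int),
    autoGo num sqr n = decide (sqr % (10 ^ n : Int) = num % (10 ^ n : Int)) := by
  induction n with
  | zero => intro num sqr; simp [autoGo]
  | succ n ih =>
    intro num sqr
    have hM : (0:Int) < 10 ^ n := by positivity
    have hfd : ∀ a : Int, PySem.Int.floordiv a 10 = a / 10 :=
      fun a => PySem.Int.floordiv_eq_ediv_of_pos (by norm_num)
    have hmd : ∀ a : Int, PySem.Int.mod a 10 = a % 10 :=
      fun a => PySem.Int.mod_eq_emod_of_pos (by norm_num)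
    have hpow : (10 ^ (n+1) : Int) = 10 * 10 ^ n := by ring
    have hnum := pv_emod_ten_mul num (10 ^ n) hM
    have hsqr := pv_emod_ten_mul sqr (10 ^ n) hM
    have hr1 : 0 ≤ num % 10 := Int.emod_nonneg num (by norm_num)
    have hr1' : num % 10 < 10 := Int.emod_lt_of_pos num (by norm_num)
    have hr2 : 0 ≤ sqr % 10 := Int.emod_nonneg sqr (by norm_num)
    have hr2' : sqr % 10 < 10 := Int.emod_lt_of_pos sqr (by norm_num)
    rw [autoGo, hpow, hnum, hsqr]
    by_cases h : num % 10 = sqr % 10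
    · simp only [hmd, h, ne_eq, not_true_eq_false, if_neg, not_false_eq_true, hfd, ih]
      rw [show (decide ((sqr / 10) % 10 ^ n = (num / 10) % 10 ^ n)) = (decide (sqr % 10 + 10 * ((sqr / 10) % 10 ^ n) = num % 10 + 10 * ((num / 10) % 10 ^ n))) from by
        simp only [decide_eq_decide]; omega]
      rw [h]
    · simp only [hmd, ne_eq, h, not_false_eq_true, if_pos]
      have b1 := Int.emod_nonneg (num / 10) (ne_of_gt hM)
      have b2 := Int.emod_nonneg (sqr / 10) (ne_of_gt hM)
      have b1' := Int.emod_lt_of_pos (num / 10) hM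
      have b2' := Int.emod_lt_of_pos (sqr / 10) hM
      rw [show (decide (sqr % 10 + 10 * ((sqr / 10) % 10 ^ n) = num % 10 + 10 * ((num / 10) % 10 ^ n))) = false from by
        simp only [decide_eq_false_iff_not]; omega]

-- tzGo shifts its accumulator
theorem pv_tzGo_shift (fuel : Nat) : ∀ (d k : Int), tzGo fuel d k = k + tzGo fuel d 0 := by
  induction fuel with
  | zero => intro d k; simp [tzGo]
  | succ fuel ih =>
    intro d k
    by_cases h : PySem.Int.mod d 10 = 0
    · rw [tzGo, if_pos h, tzGo, if_pos h, ih _ (k+1), ih _ (0+1)]; ring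
    · rw [tzGo, if_neg h, tzGo, if_neg h]; ring

-- with enough fuel, tzGo computes the exact trailing-zero count: 10^n ∣ d ↔ n ≤ tzGo
theorem pv_tzGo_spec (fuel : Nat) : ∀ (d : Int), d ≠ 0 → d.natAbs ≤ fuel →
    ∀ n : Nat, ((10:Int) ^ n ∣ d ↔ (n : Int) ≤ tzGo fuel d 0) := by
  induction fuel with
  | zero => intro d hd hf; omega
  | succ fuel ih =>
    intro d hd hf n
    have hmd : PySem.Int.mod d 10 = d % 10 := PySem.Int.mod_eq_emod_of_pos (by norm_num)
    have hfd : PySem.Int.floordiv d 10 = d / 10 := PySem.Int.floordiv_eq_ediv_of_pos (by norm_num)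
    by_cases h : d % 10 = 0
    · have hdvd : (10:Int) ∣ d := Int.dvd_of_emod_eq_zero h
      have heq : 10 * (d / 10) = d := Int.mul_ediv_cancel' hdvd
      have he0 : d / 10 ≠ 0 := by intro h0; rw [h0, mul_zero] at heq; exact hd heq.symm
      have habs : (d / 10).natAbs ≤ fuel := by
        have h10 : d.natAbs = 10 * (d / 10).natAbs := by
          rw [← heq]; simp [Int.natAbs_mul]
        omega
      rw [tzGo, hmd, if_pos h, hfd, pv_tzGo_shift]
      have hnn : (0:Int) ≤ tzGo fuel (d / 10) 0 := by
        have := (ih (d / 10) he0 habs 0).mp (by simp)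
        simpa using this
      cases n with
      | zero => simp; omega
      | succ m =>
        have : (10:Int) ^ (m+1) ∣ d ↔ (10:Int) ^ m ∣ d / 10 := by
          conv_lhs => rw [← heq]
          rw [pow_succ, mul_comm ((10:Int)^m) 10]
          exact mul_dvd_mul_iff_left (a := (10:Int)) (by norm_num)
        rw [this, ih (d / 10) he0 habs m]
        push_cast; omega
    · rw [tzGo, hmd, if_neg h]
      cases n with
      | zero => simp
      | succ m =>
        constructor
        · intro hdvd
          exfalso
          have h10 : (10:Int) ∣ d := dvd_trans (dvd_pow_self 10 (Nat.succ_ne_zero m)) hdvd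
          exact h (Int.emod_eq_zero_of_dvd h10)
        · intro hle; exfalso; push_cast at hle; omega

-- ===== VERDICT (by name: the statement is the Claim_ definition above) =====
theorem auto_spec : Claim_equal_auto := by
  intro num le _ hpre
  unfold Pre_auto at hpre
  unfold Spec_auto auto auto_alt
  rw [pv_autoGo_eq]
  set d : Int := num * num - num with hd
  by_cases h0 : d = 0
  · have hnn : num * num = num := by omega
    simp [hnn, h0]
  · simp only [h0, reduceIte]
    have hkey := pv_tzGo_spec d.natAbs d h0 (le_refl _) le.toNat
    have hmodiff : (num * num) % ((10:Int) ^ le.toNat) = num % ((10:Int) ^ le.toNat) ↔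
        (10:Int) ^ le.toNat ∣ d := by
      rw [Int.emod_eq_emod_iff_emod_sub_eq_zero, hd, Int.dvd_iff_emod_eq_zero]
    rw [decide_eq_decide]
    rw [hmodiff, hkey]
    have : ((le.toNat : Int)) = le := Int.toNat_of_nonneg hpre
    rw [this]
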